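-- pv_equiv track=rewrite | github.com/gudals113/Algorithms | 2.py | solution
-- ===== SOURCE A (Python) =====
-- from collections import defaultdict
--
-- def solution(maps):
--     answer = 0
--     N = len(maps)
--     M = len(maps[0])
--     finalDict = defaultdict(int)
--     visited = [[ 0 for _ in range(M)]for _ in range(N)]
--
--     def DFS(x,y):
--
--         visited[x][y]=1
--         word = maps[x][y]
--         count[word]+=1
--
--         for nx,ny in ([x+1,y],[x-1,y],[x,y+1],[x,y-1]):
--             if 0<=nx<N and 0<=ny<M:
--                 if maps[nx][ny]!='.' and not visited[nx][ny]:
--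
--                     DFS(nx,ny)
--
--
--     for x in range(N):
--         for y in range(M):
--             if maps[x][y]!='.' and not visited[x][y]:
--
--                 count=defaultdict(int)
--                 DFS(x,y)
--
--
--                 tmpW, tmpC = '',0
--                 for word, cnt in count.items():
--
--                     if cnt>tmpC:
--                         tmpW = word
--                         tmpC = cnt
--                     elif cnt==tmpC:
--                         if ord(tmpW) < ord(word):
--                             tmpW = word
--
--                 for word, cnt in count.items():
--                     if tmpC > cnt or word==tmpW:
--                         finalDict[tmpW]+=cnt
--
--                     else:
--                         finalDict[word]+=cnt
--
--
--     finalList = list(finalDict.items())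
--     finalList.sort(key= lambda x :-x[1])
--     answer = finalList[0][1]
--
--     return answer
-- ===== SOURCE B (Python) =====
-- def solution(maps):
--     N = len(maps)
--     M = len(maps[0])
--     finalDict = {}
--     visited = [[False] * M for _ in range(N)]
--
--     for x in range(N):
--         for y in range(M):
--             if maps[x][y] != '.' and not visited[x][y]:
--                 # iterative flood fill with an explicit stack (marks at pop time)
--                 count = {}
--                 stack = [(x, y)]
--                 while stack:
--                     cx, cy = stack.pop()
--                     if visited[cx][cy]:
--                         continue
--                     visited[cx][cy] = True
--                     w = maps[cx][cy]
--                     count[w] = count.get(w, 0) + 1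
--                     for nx, ny in ((cx, cy - 1), (cx, cy + 1), (cx - 1, cy), (cx + 1, cy)):
--                         if 0 <= nx < N and 0 <= ny < M and maps[nx][ny] != '.':
--                             stack.append((nx, ny))
--
--                 tmpC = max(count.values())
--                 tmpW = max(w for w, c in count.items() if c == tmpC)
--                 for word, cnt in count.items():
--                     if cnt == tmpC and word != tmpW:
--                         finalDict[word] = finalDict.get(word, 0) + cnt
--                     else:
--                         finalDict[tmpW] = finalDict.get(tmpW, 0) + cnt
--
--     return max(finalDict.values())
-- ===== Notes on version B (the rewrite author's own statement) =====
-- stated objective: alternative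
-- what changed: B replaces A's recursive DFS flood fill by an iterative explicit-stack fill (mark/count at pop time, push valid neighbours in reverse), computes the dominant character of a component directly via max over the counts instead of A's running fold with tie branches, and returns max(finalDict.values()) instead of sorting the final dict by descending count and taking the first entry.
import Mathlib
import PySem

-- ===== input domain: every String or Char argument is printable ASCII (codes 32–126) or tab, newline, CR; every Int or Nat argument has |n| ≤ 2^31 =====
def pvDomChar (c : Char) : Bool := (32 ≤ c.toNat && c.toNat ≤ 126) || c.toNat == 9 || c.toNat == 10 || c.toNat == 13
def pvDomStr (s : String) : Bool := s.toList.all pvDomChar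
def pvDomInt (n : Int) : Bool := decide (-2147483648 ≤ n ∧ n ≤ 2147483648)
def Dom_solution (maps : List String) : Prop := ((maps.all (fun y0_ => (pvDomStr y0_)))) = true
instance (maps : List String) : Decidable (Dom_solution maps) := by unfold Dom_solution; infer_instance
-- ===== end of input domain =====

-- B replaces A's recursive DFS flood fill by an iterative explicit-stack fill and the
-- fold-based dominant-char selection / final sort by direct max computations (objective:
-- alternative decomposition; same return value).

-- ===== PORT A =====
-- shared grid helpers (used verbatim by both ports): maps[x][y], the neighbour list,
-- the bounds-and-not-'.' test, and the "mark visited + count" update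
def pvCell (maps : List String) (x y : Int) : Char :=
  (PySem.Str.pyGet? ((PySem.List.pyGet? maps x).getD "") y).getD '.'

def pvNbrs (x y : Int) : List (Int × Int) := [(x+1,y),(x-1,y),(x,y+1),(x,y-1)]

def pvValid (maps : List String) (N M : Int) (p : Int × Int) : Bool :=
  decide (0 ≤ p.1) && decide (p.1 < N) && decide (0 ≤ p.2) && decide (p.2 < M)
    && (pvCell maps p.1 p.2 != '.')

def pvMark (maps : List String) (p : Int × Int)
    (st : List (Int × Int) × PySem.Dict Char Int) :
    List (Int × Int) × PySem.Dict Char Int :=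
  (p :: st.1, st.2.modify (pvCell maps p.1 p.2) 0 (· + 1))

-- A's DFS: the `for nx,ny in …` loop over the remaining neighbour list, recursing into
-- every valid unvisited neighbour (the callee first marks itself, then walks its own
-- neighbours).  Fuel is one unit per marked cell; `min r1.2 g` only clamps for the
-- termination measure (fuel never grows: pvDfsGo_fuel_le below) and never changes a value.
def pvDfsGo (maps : List String) (N M : Int) :
    Nat → List (Int × Int) → List (Int × Int) × PySem.Dict Char Int →
    (List (Int × Int) × PySem.Dict Char Int) × Nat
  | f, [], st => (st, f)
  | f, p :: ps, st =>
    if pvValid maps N M p && !(st.1.contains p) then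
      match f with
      | 0 => pvDfsGo maps N M 0 ps st
      | g+1 =>
        let r1 := pvDfsGo maps N M g (pvNbrs p.1 p.2) (pvMark maps p st)
        pvDfsGo maps N M (min r1.2 g) ps r1.1
    else
      pvDfsGo maps N M f ps st
  termination_by f ps => (f, ps.length)
  decreasing_by
  · exact Prod.Lex.right _ (Nat.lt_succ_self _)
  · exact Prod.Lex.left _ _ (Nat.lt_succ_self _)
  · exact Prod.Lex.left _ _ (Nat.lt_succ_of_le (Nat.min_le_right _ _))
  · exact Prod.Lex.right _ (Nat.lt_succ_self _)

-- DFS(x, y): mark and count the cell, then walk its neighbour list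
def pvDFS (maps : List String) (N M : Int) (f : Nat) (x y : Int)
    (st : List (Int × Int) × PySem.Dict Char Int) :
    (List (Int × Int) × PySem.Dict Char Int) × Nat :=
  match f with
  | 0 => (st, 0)
  | g+1 => pvDfsGo maps N M g (pvNbrs x y) (pvMark maps (x, y) st)

-- A's first `for word, cnt in count.items()` loop (tmpW = '' is never consulted, since
-- every count is ≥ 1, so the first item takes the cnt > tmpC branch; '\x00' models it)
def pvSelectA (items : List (Char × Int)) : Char × Int :=
  items.foldl (fun acc wc =>
    if acc.2 < wc.2 then (wc.1, wc.2)
    else if wc.2 == acc.2 && decide (acc.1 < wc.1) then (wc.1, acc.2)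
    else acc) ('\x00', 0)

-- the body of A's double loop over the grid
def pvStepA (maps : List String) (N M : Int) (F : Nat)
    (ost : List (Int × Int) × PySem.Dict Char Int) (x y : Int) :
    List (Int × Int) × PySem.Dict Char Int :=
  if pvCell maps x y != '.' && !(ost.1.contains (x, y)) then
    let r := pvDFS maps N M F x y (ost.1, PySem.Dict.empty)
    let tw := pvSelectA r.1.2.items
    let fd := r.1.2.items.foldl (fun fd wc =>
      if decide (wc.2 < tw.2) || wc.1 == tw.1 then fd.modify tw.1 0 (· + wc.2)
      else fd.modify wc.1 0 (· + wc.2)) ost.2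
    (r.1.1, fd)
  else ost

def solution (maps : List String) : Int :=
  let N : Int := maps.length
  let M : Int := PySem.Str.len ((PySem.List.pyGet? maps 0).getD "")
  let F : Nat := N.toNat * M.toNat + 1   -- fuel: strictly more than the number of cells ever marked
  let fin := (PySem.List.pyRange 0 N).foldl (fun ost x =>
    (PySem.List.pyRange 0 M).foldl (fun ost y => pvStepA maps N M F ost x y) ost)
    ([], PySem.Dict.empty)
  let finalList := PySem.List.sorted fin.2.items (fun p => -p.2) false
  ((PySem.List.pyGet? finalList 0).getD ('\x00', 0)).2

-- ===== PORT B =====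
-- B's `while stack:` loop; the Lean list's head is the Python stack's top.  Source B appends
-- the REVERSED valid-neighbour tuple to the end of its stack, so the next pops come in
-- exactly pvNbrs order: consing `(pvNbrs …).filter (pvValid …)` is that push.
def pvFill (maps : List String) (N M : Int) :
    Nat → List (Int × Int) → List (Int × Int) × PySem.Dict Char Int →
    List (Int × Int) × PySem.Dict Char Int
  | _, [], st => st
  | f, p :: s, st =>
    if st.1.contains p then pvFill maps N M f s st
    else
      match f with
      | 0 => st   -- fuel guard only; never reached from solution_alt
      | g+1 =>
        pvFill maps N M g ((pvNbrs p.1 p.2).filter (pvValid maps N M) ++ s)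
          (pvMark maps p st)
  termination_by f s => (f, s.length)
  decreasing_by
  · exact Prod.Lex.right _ (Nat.lt_succ_self _)
  · exact Prod.Lex.left _ _ (Nat.lt_succ_self _)

-- the body of B's double loop over the grid
def pvStepB (maps : List String) (N M : Int) (F : Nat)
    (ost : List (Int × Int) × PySem.Dict Char Int) (x y : Int) :
    List (Int × Int) × PySem.Dict Char Int :=
  if pvCell maps x y != '.' && !(ost.1.contains (x, y)) then
    let st := pvFill maps N M F [(x, y)] (ost.1, PySem.Dict.empty)
    let tmpC := (PySem.List.max? st.2.values (fun v => v)).getD 0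
    let tmpW := (PySem.List.max?
      ((st.2.items.filter (fun p => p.2 == tmpC)).map Prod.fst) (fun w => w)).getD '\x00'
    let fd := st.2.items.foldl (fun fd wc =>
      if wc.2 == tmpC && wc.1 != tmpW then fd.modify wc.1 0 (· + wc.2)
      else fd.modify tmpW 0 (· + wc.2)) ost.2
    (st.1, fd)
  else ost

def solution_alt (maps : List String) : Int :=
  let N : Int := maps.length
  let M : Int := PySem.Str.len ((PySem.List.pyGet? maps 0).getD "")
  let F : Nat := N.toNat * M.toNat + 1
  let fin := (PySem.List.pyRange 0 N).foldl (fun ost x =>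
    (PySem.List.pyRange 0 M).foldl (fun ost y => pvStepB maps N M F ost x y) ost)
    ([], PySem.Dict.empty)
  (PySem.List.max? fin.2.values (fun v => v)).getD 0

-- ===== PRECONDITION & SPEC =====
-- Pre_solution excludes exactly the inputs on which the Python A raises: the empty list
-- (IndexError on maps[0]), a grid whose first len(maps[0]) columns are all '.' or empty
-- (IndexError on finalList[0]), and ragged inputs with a row shorter than the first row
-- (IndexError on maps[x][y]).
def Pre_solution (maps : List String) : Prop :=
  maps ≠ [] ∧
  (maps.all (fun s => decide ((maps.headD "").toList.length ≤ s.toList.length))) = true ∧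
  (maps.any (fun s =>
    (s.toList.take (maps.headD "").toList.length).any (fun c => c != '.'))) = true
instance (maps : List String) : Decidable (Pre_solution maps) := by
  unfold Pre_solution; infer_instance

def pvWitness_solution : List String := ["ab", "a."]

def Spec_solution (maps : List String) (out : Int) : Prop := out = solution_alt maps
instance (maps : List String) (out : Int) : Decidable (Spec_solution maps out) := by
  unfold Spec_solution; infer_instance

-- ===== CLAIM (what is proved, stated in full; the proofs are below) =====
def Claim_equal_solution : Prop :=
  ∀ (maps : List String), Dom_solution maps → Pre_solution maps →
    Spec_solution maps (solution maps)

-- ===== LEMMAS AND PROOFS =====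

theorem pvFill_zero (maps : List String) (N M : Int) :
    ∀ (s : List (Int × Int)) st, pvFill maps N M 0 s st = st := by
  intro s
  induction s with
  | nil => intro st; simp [pvFill]
  | cons p s ih => intro st; rw [pvFill]; split <;> simp [ih]

theorem pvDfsGo_zero (maps : List String) (N M : Int) :
    ∀ (L : List (Int × Int)) st, pvDfsGo maps N M 0 L st = (st, 0) := by
  intro L
  induction L with
  | nil => intro st; simp [pvDfsGo]
  | cons p ps ih => intro st; rw [pvDfsGo]; split <;> simp [ih]

theorem pvDfsGo_fuel_le (maps : List String) (N M : Int) :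
    ∀ (f : Nat) (L : List (Int × Int)) st, (pvDfsGo maps N M f L st).2 ≤ f := by
  intro f L st
  induction f, L, st using pvDfsGo.induct maps N M with
  | case1 f st => simp [pvDfsGo]
  | case2 p ps st h ih => rw [pvDfsGo, if_pos h]; exact ih
  | case3 p ps st h g r1 ih1 ih2 =>
    rw [pvDfsGo, if_pos h]
    have h3 : min r1.2 g ≤ g := Nat.min_le_right _ _
    exact Nat.le_succ_of_le (le_trans ih2 h3)
  | case4 f p ps st h ih => cases f <;> rw [pvDfsGo, if_neg h] <;> exact ih

theorem pvSubsim (maps : List String) (N M : Int) :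
    ∀ (f : Nat) (L : List (Int × Int)) st (s : List (Int × Int)),
      pvFill maps N M f (L.filter (pvValid maps N M) ++ s) st
        = pvFill maps N M (pvDfsGo maps N M f L st).2 s (pvDfsGo maps N M f L st).1 := by
  intro f L st
  induction f, L, st using pvDfsGo.induct maps N M with
  | case1 f st => intro s; simp [pvDfsGo]
  | case2 p ps st h ih =>
    intro s
    rw [pvDfsGo, if_pos h, pvDfsGo_zero]
    simp [pvFill_zero]
  | case3 p ps st h g r1 ih1 ih2 =>
    intro s
    have hv : pvValid maps N M p = true := by
      have h' := h; simp [Bool.and_eq_true] at h'; exact h'.1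
    have hc : st.1.contains p = false := by
      have h' := h; simp [Bool.and_eq_true] at h'; simpa using h'.2
    rw [pvDfsGo, if_pos h]
    simp only [List.filter_cons, hv, if_true, List.cons_append]
    rw [pvFill]
    simp only [hc, Bool.false_eq_true, if_false]
    rw [ih1 (List.filter (pvValid maps N M) ps ++ s)]
    have hmin : min (pvDfsGo maps N M g (pvNbrs p.1 p.2) (pvMark maps p st)).2 g
        = (pvDfsGo maps N M g (pvNbrs p.1 p.2) (pvMark maps p st)).2 :=
      Nat.min_eq_left (pvDfsGo_fuel_le maps N M g _ _)
    rw [hmin] at ih2 ⊢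
    exact ih2 s
  | case4 f p ps st h ih =>
    intro s
    by_cases hv : pvValid maps N M p = true
    · have hc : st.1.contains p = true := by
        cases hcp : st.1.contains p
        · have hnm : p ∉ st.1 := by simpa using hcp
          exact absurd (by simp [hv, hnm] :
            (pvValid maps N M p && !st.1.contains p) = true) h
        · rfl
      simp only [List.filter_cons, hv, if_true, List.cons_append]
      cases f <;> rw [pvDfsGo, if_neg h] <;> rw [pvFill] <;> simp only [hc, if_true] <;>
        exact ih s
    · have hv' : pvValid maps N M p = false := by simpa using hv
      simp only [List.filter_cons, hv', Bool.false_eq_true, if_false]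
      cases f <;> rw [pvDfsGo, if_neg h] <;> exact ih s

theorem pvFill_nil (maps : List String) (N M : Int) :
    ∀ (f : Nat) st, pvFill maps N M f [] st = st := by
  intro f st; cases f <;> rw [pvFill]

theorem pvFill_seed (maps : List String) (N M : Int) (F : Nat) (x y : Int) st
    (h : st.1.contains (x, y) = false) :
    pvFill maps N M F [(x, y)] st = (pvDFS maps N M F x y st).1 := by
  cases F with
  | zero => rw [pvFill]; simp [pvDFS, pvFill_zero]
  | succ g =>
    rw [pvFill]
    simp only [h, Bool.false_eq_true, if_false]
    rw [pvSubsim maps N M g (pvNbrs x y) (pvMark maps (x, y) st) [], pvFill_nil, pvDFS]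

theorem pvDfsGo_inv (maps : List String) (N M : Int)
    (P : List (Int × Int) × PySem.Dict Char Int → Prop)
    (hmark : ∀ p st, P st → P (pvMark maps p st)) :
    ∀ (f : Nat) (L : List (Int × Int)) st, P st → P (pvDfsGo maps N M f L st).1 := by
  intro f L st
  induction f, L, st using pvDfsGo.induct maps N M with
  | case1 f st => intro hp; simpa [pvDfsGo] using hp
  | case2 p ps st h ih => intro hp; rw [pvDfsGo, if_pos h]; exact ih hp
  | case3 p ps st h g r1 ih1 ih2 =>
    intro hp
    rw [pvDfsGo, if_pos h]
    exact ih2 (ih1 (hmark p st hp))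
  | case4 f p ps st h ih =>
    intro hp
    cases f <;> rw [pvDfsGo, if_neg h] <;> exact ih hp

def pvStep (acc wc : Char × Int) : Char × Int :=
  if acc.2 < wc.2 then (wc.1, wc.2)
  else if wc.2 == acc.2 && decide (acc.1 < wc.1) then (wc.1, acc.2)
  else acc

def pvLexLe (a b : Char × Int) : Prop := a.2 < b.2 ∨ (a.2 = b.2 ∧ a.1 ≤ b.1)

theorem pvLexLe_trans {a b c : Char × Int} (h1 : pvLexLe a b) (h2 : pvLexLe b c) :
    pvLexLe a c := by
  rcases h1 with h1 | ⟨h1, h1'⟩ <;> rcases h2 with h2 | ⟨h2, h2'⟩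
  · exact Or.inl (lt_trans h1 h2)
  · exact Or.inl (h2 ▸ h1)
  · exact Or.inl (h1 ▸ h2)
  · exact Or.inr ⟨h1.trans h2, le_trans h1' h2'⟩

theorem pvStep_le_left (acc wc : Char × Int) : pvLexLe acc (pvStep acc wc) := by
  unfold pvStep pvLexLe
  split_ifs with h1 h2
  · exact Or.inl h1
  · simp only [Bool.and_eq_true, beq_iff_eq, decide_eq_true_eq] at h2
    exact Or.inr ⟨rfl, le_of_lt h2.2⟩
  · exact Or.inr ⟨rfl, le_refl _⟩

theorem pvStep_le_right (acc wc : Char × Int) : pvLexLe wc (pvStep acc wc) := by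
  unfold pvStep pvLexLe
  split_ifs with h1 h2
  · exact Or.inr ⟨rfl, le_refl _⟩
  · simp only [Bool.and_eq_true, beq_iff_eq, decide_eq_true_eq] at h2
    exact Or.inr ⟨h2.1, le_refl _⟩
  · simp only [Bool.and_eq_true, beq_iff_eq, decide_eq_true_eq, not_and, not_lt] at h2
    rcases lt_or_eq_of_le (le_of_not_gt h1) with h3 | h3
    · exact Or.inl h3
    · exact Or.inr ⟨h3, h2 h3⟩

theorem pvFoldStep_mem : ∀ (L : List (Char × Int)) acc,
    L.foldl pvStep acc = acc ∨ L.foldl pvStep acc ∈ L := by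
  intro L
  induction L with
  | nil => intro acc; exact Or.inl rfl
  | cons wc L ih =>
    intro acc
    rcases ih (pvStep acc wc) with h | h
    · rw [List.foldl_cons, h]
      unfold pvStep
      split_ifs with h1 h2
      · exact Or.inr (List.mem_cons_self)
      · simp only [Bool.and_eq_true, beq_iff_eq, decide_eq_true_eq] at h2
        have : (wc.1, acc.2) = wc := by rw [← h2.1]
        rw [this]; exact Or.inr (List.mem_cons_self)
      · exact Or.inl rfl
    · exact Or.inr (List.mem_cons_of_mem _ h)

theorem pvFoldStep_ge : ∀ (L : List (Char × Int)) acc,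
    pvLexLe acc (L.foldl pvStep acc) ∧ ∀ p ∈ L, pvLexLe p (L.foldl pvStep acc) := by
  intro L
  induction L with
  | nil => intro acc; exact ⟨Or.inr ⟨rfl, le_refl _⟩, by simp⟩
  | cons wc L ih =>
    intro acc
    rw [List.foldl_cons]
    rcases ih (pvStep acc wc) with ⟨h1, h2⟩
    refine ⟨pvLexLe_trans (pvStep_le_left acc wc) h1, ?_⟩
    intro p hp
    rcases List.mem_cons.mp hp with rfl | hp
    · exact pvLexLe_trans (pvStep_le_right acc p) h1
    · exact h2 p hp

theorem pvSelectA_eq_foldl (L : List (Char × Int)) :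
    pvSelectA L = L.foldl pvStep ('\x00', 0) := rfl

theorem pvSelect_eq (L : List (Char × Int)) (hne : L ≠ [])
    (hpos : ∀ p ∈ L, 0 < p.2) :
    pvSelectA L =
      (((PySem.List.max? ((L.filter
          (fun p => p.2 == (PySem.List.max? (L.map Prod.snd) (fun v => v)).getD 0)).map
          Prod.fst) (fun w => w)).getD '\x00'),
       (PySem.List.max? (L.map Prod.snd) (fun v => v)).getD 0) := by
  rw [pvSelectA_eq_foldl]
  obtain ⟨m, hm⟩ : ∃ m, L.foldl pvStep ('\x00', 0) = m := ⟨_, rfl⟩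
  rw [hm]
  have hge := (pvFoldStep_ge L ('\x00', 0)).2
  rw [hm] at hge
  -- the fold result is an element of L
  have hmem : m ∈ L := by
    have hc := pvFoldStep_mem L ('\x00', 0)
    rw [hm] at hc
    rcases hc with h | h
    · exfalso
      rcases List.exists_mem_of_ne_nil L hne with ⟨p, hp⟩
      have hle := hge p hp
      rw [h] at hle
      rcases hle with h' | ⟨h', _⟩ <;> have hp2 := hpos p hp <;> simp at h' <;> omega
    · exact h
  -- the maximal value
  rcases hv : PySem.List.max? (L.map Prod.snd) (fun v => v) with _ | c
  · rw [PySem.List.max?_eq_none_iff] at hv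
    exact absurd (List.map_eq_nil_iff.mp hv) hne
  have hcmax : ∀ p ∈ L, p.2 ≤ c := by
    intro p hp
    exact PySem.List.max?_isMax hv p.2 (List.mem_map_of_mem hp)
  have hm2 : m.2 = c := by
    rcases PySem.List.max?_mem hv with hq
    rcases List.mem_map.mp hq with ⟨q, hqL, hq2⟩
    have h1 := hge q hqL
    have h2 := hcmax m hmem
    rcases h1 with h1 | ⟨h1, _⟩ <;> omega
  -- the maximal word among maximal values
  rcases hw : PySem.List.max? ((L.filter (fun p => p.2 == c)).map Prod.fst)
      (fun w => w) with _ | w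
  · rw [PySem.List.max?_eq_none_iff, List.map_eq_nil_iff, List.filter_eq_nil_iff] at hw
    exact absurd (by simpa using hm2) (hw m hmem)
  have hm1 : m.1 = w := by
    have hmf : m.1 ∈ (L.filter (fun p => p.2 == c)).map Prod.fst :=
      List.mem_map_of_mem (List.mem_filter.mpr ⟨hmem, by simpa using hm2⟩)
    have h1 : m.1 ≤ w := PySem.List.max?_isMax hw m.1 hmf
    rcases List.mem_map.mp (PySem.List.max?_mem hw) with ⟨q, hqf, hq1⟩
    rcases List.mem_filter.mp hqf with ⟨hqL, hq2⟩
    simp only [beq_iff_eq] at hq2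
    have h2 := hge q hqL
    rcases h2 with h2 | ⟨_, h2⟩
    · omega
    · exact le_antisymm h1 (hq1 ▸ h2)
  simp only [Option.getD_some]
  rw [hw]
  simp only [Option.getD_some]
  exact Prod.ext hm1 hm2

theorem pvExtract_eq (d : PySem.Dict Char Int) :
    ((PySem.List.pyGet? (PySem.List.sorted d.items (fun p => -p.2) false) 0).getD
        ('\x00', 0)).2
      = (PySem.List.max? d.values (fun v => v)).getD 0 := by
  have hval : d.values = d.items.map Prod.snd := rfl
  rcases hs : PySem.List.sorted d.items (fun p => -p.2) false with _ | ⟨m, t⟩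
  · rw [PySem.List.sorted_eq_nil_iff] at hs
    have hv : PySem.List.max? d.values (fun v => v) = none := by
      rw [PySem.List.max?_eq_none_iff, hval, hs]; rfl
    rw [hv]
    simp [PySem.List.pyGet?_zero]
  · have hm : m ∈ d.items := by
      have hx : m ∈ PySem.List.sorted d.items (fun p => -p.2) false := by
        rw [hs]; exact List.mem_cons_self
      rwa [PySem.List.mem_sorted] at hx
    have hhead := PySem.List.key_head_sorted_le d.items (fun p => -p.2) hs
    rcases hv : PySem.List.max? d.values (fun v => v) with _ | v
    · rw [PySem.List.max?_eq_none_iff, hval, List.map_eq_nil_iff] at hv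
      rw [hv] at hm; cases hm
    · have h1 : v ≤ m.2 := by
        rcases List.mem_map.mp (by rw [← hval]; exact PySem.List.max?_mem hv)
          with ⟨q, hqL, hq2⟩
        have h3 := hhead q hqL
        simp only at h3
        omega
      have h2 : m.2 ≤ v := by
        exact PySem.List.max?_isMax hv m.2 (by rw [hval]; exact List.mem_map_of_mem hm)
      rw [PySem.List.pyGet?_zero_cons]
      simp only [Option.getD_some]
      omega

theorem pvFd_eq (tw : Char × Int) (L : List (Char × Int)) (fd0 : PySem.Dict Char Int)
    (hmax : ∀ p ∈ L, p.2 ≤ tw.2) :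
    L.foldl (fun fd wc =>
      if decide (wc.2 < tw.2) || wc.1 == tw.1 then fd.modify tw.1 0 (· + wc.2)
      else fd.modify wc.1 0 (· + wc.2)) fd0
    = L.foldl (fun fd wc =>
      if wc.2 == tw.2 && wc.1 != tw.1 then fd.modify wc.1 0 (· + wc.2)
      else fd.modify tw.1 0 (· + wc.2)) fd0 := by
  apply PySem.List.foldl_congr_mem
  intro fd p hp
  have hle := hmax p hp
  by_cases h2 : p.2 = tw.2
  · by_cases h1 : p.1 = tw.1 <;> simp [h1, h2]
  · have hlt : p.2 < tw.2 := lt_of_le_of_ne hle h2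
    simp [h2, hlt]

theorem pvAgg_eq (L : List (Char × Int)) (fd0 : PySem.Dict Char Int)
    (hne : L ≠ []) (hpos : ∀ p ∈ L, 0 < p.2) :
    (L.foldl (fun fd wc =>
      if decide (wc.2 < (pvSelectA L).2) || wc.1 == (pvSelectA L).1 then
        fd.modify (pvSelectA L).1 0 (· + wc.2)
      else fd.modify wc.1 0 (· + wc.2)) fd0)
    = (L.foldl (fun fd wc =>
      if wc.2 == (PySem.List.max? (L.map Prod.snd) (fun v => v)).getD 0
          && wc.1 != (PySem.List.max? ((L.filter
              (fun p => p.2 == (PySem.List.max? (L.map Prod.snd) (fun v => v)).getD 0)).map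
              Prod.fst) (fun w => w)).getD '\x00' then
        fd.modify wc.1 0 (· + wc.2)
      else fd.modify ((PySem.List.max? ((L.filter
              (fun p => p.2 == (PySem.List.max? (L.map Prod.snd) (fun v => v)).getD 0)).map
              Prod.fst) (fun w => w)).getD '\x00') 0 (· + wc.2)) fd0) := by
  have hsel := pvSelect_eq L hne hpos
  have hmax : ∀ p ∈ L, p.2 ≤ (pvSelectA L).2 := by
    intro p hp
    rw [hsel]
    rcases hv : PySem.List.max? (L.map Prod.snd) (fun v => v) with _ | c
    · rw [PySem.List.max?_eq_none_iff, List.map_eq_nil_iff] at hv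
      exact absurd hv hne
    · simpa using PySem.List.max?_isMax hv p.2 (List.mem_map_of_mem hp)
  rw [pvFd_eq _ _ _ hmax, hsel]

theorem pvStep_eq (maps : List String) (N M : Int) (F : Nat) ost (x y : Int) :
    pvStepA maps N M F ost x y = pvStepB maps N M F ost x y := by
  unfold pvStepA pvStepB
  by_cases hg : (pvCell maps x y != '.' && !(ost.1.contains (x, y))) = true
  swap
  · rw [if_neg hg, if_neg hg]
  rw [if_pos hg, if_pos hg]
  have hc : ost.1.contains (x, y) = false := by
    rcases Bool.and_eq_true .. |>.mp hg with ⟨_, h2⟩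
    simpa using h2
  rw [pvFill_seed maps N M F x y (ost.1, PySem.Dict.empty) hc]
  cases F with
  | zero => rfl
  | succ g =>
    -- the count dict after the DFS is nonempty with positive values
    have hinv := pvDfsGo_inv maps N M
      (fun st => (∀ p ∈ st.2.items, 0 < p.2) ∧ st.2.items ≠ [])
      (by
        intro p st ⟨hpos, hne⟩
        constructor
        · intro q hq
          have : q = (pvCell maps p.1 p.2, st.2.getD (pvCell maps p.1 p.2) 0 + 1)
              ∨ (q ∈ st.2.items ∧ q.1 ≠ pvCell maps p.1 p.2) := by
            simpa using (PySem.Dict.mem_items_insert st.2 _ _ q).mp hq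
          rcases this with rfl | ⟨hq', _⟩
          · have hnn : 0 ≤ st.2.getD (pvCell maps p.1 p.2) 0 := by
              rw [PySem.Dict.getD_eq_get?_getD]
              rcases hget : st.2.get? (pvCell maps p.1 p.2) with _ | v
              · simp
              · simp only [Option.getD_some]
                exact le_of_lt (hpos _ (PySem.Dict.mem_items_of_get?_eq_some st.2 hget))
            simp only
            omega
          · exact hpos q hq'
        · intro habs
          rw [show (pvMark maps p st).2
              = st.2.insert (pvCell maps p.1 p.2) (st.2.getD (pvCell maps p.1 p.2) 0 + 1)
              from rfl] at habs
          rcases hcont : st.2.contains (pvCell maps p.1 p.2) with _|_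
          · rw [PySem.Dict.items_insert_of_not_contains _ _ hcont] at habs
            simp at habs
          · rw [PySem.Dict.items_insert_of_contains _ _ hcont] at habs
            simp only [List.map_eq_nil_iff] at habs
            exact hne habs)
      g (pvNbrs x y) (pvMark maps (x, y) (ost.1, PySem.Dict.empty))
      (by
        constructor
        · intro q hq
          have he : (PySem.Dict.empty : PySem.Dict Char Int).contains
              (pvCell maps x y) = false := by simp
          rw [show (pvMark maps (x, y) (ost.1, PySem.Dict.empty)).2
              = PySem.Dict.insert PySem.Dict.empty (pvCell maps x y)
                  ((PySem.Dict.empty : PySem.Dict Char Int).getD (pvCell maps x y) 0 + 1)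
              from rfl] at hq
          rw [PySem.Dict.items_insert_of_not_contains _ _ he] at hq
          simp at hq
          rcases hq with hq | rfl
          · simp [PySem.Dict.empty] at hq
          · simp
        · intro habs
          have he : (PySem.Dict.empty : PySem.Dict Char Int).contains
              (pvCell maps x y) = false := by simp
          rw [show (pvMark maps (x, y) (ost.1, PySem.Dict.empty)).2
              = PySem.Dict.insert PySem.Dict.empty (pvCell maps x y)
                  ((PySem.Dict.empty : PySem.Dict Char Int).getD (pvCell maps x y) 0 + 1)
              from rfl, PySem.Dict.items_insert_of_not_contains _ _ he] at habs
          simp at habs)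
    obtain ⟨hpos, hne⟩ := hinv
    show (((pvDFS maps N M (g+1) x y (ost.1, PySem.Dict.empty)).1.1, _) :
        List (Int × Int) × PySem.Dict Char Int) = _
    rw [show pvDFS maps N M (g+1) x y (ost.1, PySem.Dict.empty)
        = pvDfsGo maps N M g (pvNbrs x y) (pvMark maps (x, y) (ost.1, PySem.Dict.empty))
        from rfl]
    refine congrArg _ ?_
    show _ = (pvDfsGo maps N M g (pvNbrs x y)
        (pvMark maps (x, y) (ost.1, PySem.Dict.empty))).1.2.items.foldl _ ost.2
    rw [show (pvDfsGo maps N M g (pvNbrs x y)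
        (pvMark maps (x, y) (ost.1, PySem.Dict.empty))).1.2.values
      = (pvDfsGo maps N M g (pvNbrs x y)
        (pvMark maps (x, y) (ost.1, PySem.Dict.empty))).1.2.items.map Prod.snd from rfl]
    exact pvAgg_eq _ ost.2 hne hpos

-- ===== VERDICT (by name: the statement is the Claim_ definition above) =====
theorem solution_spec : Claim_equal_solution := by
  intro maps _ _
  unfold Spec_solution solution solution_alt
  simp only [pvStep_eq, pvExtract_eq]
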